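-- pv_equiv track=rewrite | github.com/webtechman/splits-happen | bowlarama.py | convert_numbers_ary_to_frames_ary
-- ===== SOURCE A (Python) =====
-- def convert_numbers_ary_to_frames_ary(score_numbers_ary):
--     """
--     This process converts an array of individual numbers into frame sets with running total.
-- 	Sample call:
-- 	convert_numbers_ary_to_frames_ary([10, 0, 7, 3, 9, 0, 10, 0, 0, 8, 8, 2, 0, 6, 10, 0, 10, 0, 10, 0, 8, 1])
-- 	Sample return:
--     [20, 39, 48, 66, 74, 84, 90, 120, 148, 167]
--     """
--     frames_ary = []
--     game_total = 0
--     i = 0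
--     f = 0
--     for n in score_numbers_ary:
--         if i >= 20:
--             break
--         roll1 = score_numbers_ary[i]
--         roll2 = score_numbers_ary[i+1]
--         temp_score = roll1 + roll2
--         if temp_score == 10 and roll1 == 10:
--             nextroll1 = score_numbers_ary[i+2]
--             nextroll2 = score_numbers_ary[i+3]
--             if nextroll1 == 10:
--                 nextroll2 = score_numbers_ary[i+4]
--             game_total = game_total + temp_score + nextroll1 + nextroll2
--         elif temp_score == 10 and roll1 != 10:
--             nextroll1 = score_numbers_ary[i+2]
--             game_total = game_total + temp_score + nextroll1
--         else:
--             game_total = game_total + temp_score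
--         frames_ary.append(game_total)
--         i = i + 2
--     return frames_ary
-- ===== SOURCE B (Python) =====
-- def convert_numbers_ary_to_frames_ary(score_numbers_ary):
--     # Recursive decomposition: an empty record has no frames; otherwise score
--     # exactly 10 frames by destructuring the roll list two rolls at a time
--     # (a frame is a pair of rolls, strikes stored as 10,0), peeking into the
--     # remaining suffix for bonuses, consing the running total onto the
--     # recursion with a frames-left countdown.
--     def go(rs, left, total):
--         if left == 0:
--             return []
--         r1, r2, rest = rs[0], rs[1], rs[2:]
--         if r1 == 10 and r2 == 0:
--             inc = 10 + rest[0] + (rest[2] if rest[0] == 10 else rest[1])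
--         elif r1 + r2 == 10:
--             inc = 10 + rest[0]
--         else:
--             inc = r1 + r2
--         total += inc
--         return [total] + go(rest, left - 1, total)
--     if not score_numbers_ary:
--         return []
--     return go(score_numbers_ary, 10, 0)
-- ===== Notes on version B (the rewrite author's own statement) =====
-- stated objective: alternative
-- what changed: B replaces A's iterative element-loop with a global index counter, break-at-20 test and list appends by a recursive function that destructures the roll list two rolls at a time (slicing off each consumed frame and peeking into the remaining suffix for bonuses), counts frames down from 10, and builds the result by consing the running total onto the recursive call.
import Mathlib
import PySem

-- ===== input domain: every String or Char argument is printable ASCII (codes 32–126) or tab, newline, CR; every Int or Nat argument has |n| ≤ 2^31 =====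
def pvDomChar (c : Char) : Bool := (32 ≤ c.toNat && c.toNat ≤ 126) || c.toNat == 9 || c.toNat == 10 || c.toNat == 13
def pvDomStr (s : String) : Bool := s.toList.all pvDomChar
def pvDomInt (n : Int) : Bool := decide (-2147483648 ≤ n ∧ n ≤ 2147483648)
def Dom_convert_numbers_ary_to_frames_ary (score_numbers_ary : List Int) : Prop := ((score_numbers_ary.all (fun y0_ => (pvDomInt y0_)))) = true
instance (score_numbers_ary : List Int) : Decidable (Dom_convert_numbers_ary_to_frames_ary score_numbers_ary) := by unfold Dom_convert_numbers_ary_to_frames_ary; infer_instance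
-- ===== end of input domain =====

-- B scores the frames by recursive destructuring of the roll list instead of A's
-- indexed loop; equality is about the return value on inputs where A returns
-- (inside Pre_ every index access is in range, so getD's default is never used).

-- ===== PORT A =====
-- A's for-loop over the elements with manual index i, break at i ≥ 20, running total,
-- frames appended at the back.  One loop-body update of game_total (branches in A's order):
def pvAStep (xs : List Int) (game_total : Int) (i : Nat) : Int :=
  let roll1 := xs.getD i 0
  let roll2 := xs.getD (i+1) 0
  let temp_score := roll1 + roll2
  if temp_score = 10 ∧ roll1 = 10 then
    let nextroll1 := xs.getD (i+2) 0
    let nextroll2 := xs.getD (i+3) 0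
    let nextroll2 := if nextroll1 = 10 then xs.getD (i+4) 0 else nextroll2
    game_total + temp_score + nextroll1 + nextroll2
  else if temp_score = 10 ∧ roll1 ≠ 10 then
    let nextroll1 := xs.getD (i+2) 0
    game_total + temp_score + nextroll1
  else
    game_total + temp_score

def pvGoA (xs : List Int) : List Int → List Int → Int → Nat → List Int
  | [], frames, _, _ => frames
  | _ :: rest, frames, game_total, i =>
    if 20 ≤ i then frames
    else
      let game_total := pvAStep xs game_total i
      pvGoA xs rest (frames ++ [game_total]) game_total (i + 2)

def convert_numbers_ary_to_frames_ary (score_numbers_ary : List Int) : List Int :=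
  pvGoA score_numbers_ary score_numbers_ary [] 0 0

-- ===== PORT B =====
-- B's recursive helper go(rs, left, total): destructure two rolls off the front,
-- peek into the remaining suffix for bonuses, cons the running total onto the
-- recursion on the suffix with the frame countdown decreased (rs[k] is in range
-- inside Pre_; outside it the Python raises, so getD's default is never the value used).
def pvGoB (rs : List Int) : Nat → Int → List Int
  | 0, _ => []
  | Nat.succ l, total =>
      let r1 := rs.getD 0 0
      let r2 := rs.getD 1 0
      let rest := rs.drop 2
      let inc :=
        if r1 = 10 ∧ r2 = 0 then
          10 + rest.getD 0 0 + (if rest.getD 0 0 = 10 then rest.getD 2 0 else rest.getD 1 0)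
        else if r1 + r2 = 10 then 10 + rest.getD 0 0
        else r1 + r2
      (total + inc) :: pvGoB rest l (total + inc)

def convert_numbers_ary_to_frames_ary_alt (score_numbers_ary : List Int) : List Int :=
  if score_numbers_ary = [] then [] else pvGoB score_numbers_ary 10 0

-- ===== PRECONDITION & SPEC =====
-- Pre_ admits exactly the inputs on which the Python A returns (no IndexError): the empty
-- list, or at least 20 rolls with the extra look-ahead rolls present that frames 9 and 10
-- need when they are strikes or spares.
def Pre_convert_numbers_ary_to_frames_ary (score_numbers_ary : List Int) : Prop :=
  score_numbers_ary = [] ∨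
  (20 ≤ score_numbers_ary.length ∧
    (score_numbers_ary.getD 16 0 = 10 ∧ score_numbers_ary.getD 17 0 = 0 ∧
       score_numbers_ary.getD 18 0 = 10 → 21 ≤ score_numbers_ary.length) ∧
    (score_numbers_ary.getD 18 0 = 10 ∧ score_numbers_ary.getD 19 0 = 0 →
       22 ≤ score_numbers_ary.length ∧
       (score_numbers_ary.getD 20 0 = 10 → 23 ≤ score_numbers_ary.length)) ∧
    (score_numbers_ary.getD 18 0 + score_numbers_ary.getD 19 0 = 10 ∧
       score_numbers_ary.getD 18 0 ≠ 10 → 21 ≤ score_numbers_ary.length))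
instance (score_numbers_ary : List Int) : Decidable (Pre_convert_numbers_ary_to_frames_ary score_numbers_ary) := by unfold Pre_convert_numbers_ary_to_frames_ary; infer_instance

def pvWitness_convert_numbers_ary_to_frames_ary : List Int :=
  [10, 0, 7, 3, 9, 0, 10, 0, 0, 8, 8, 2, 0, 6, 10, 0, 10, 0, 10, 0, 8, 1]

def Spec_convert_numbers_ary_to_frames_ary (score_numbers_ary : List Int) (out : List Int) : Prop := out = convert_numbers_ary_to_frames_ary_alt score_numbers_ary
instance (score_numbers_ary : List Int) (out : List Int) : Decidable (Spec_convert_numbers_ary_to_frames_ary score_numbers_ary out) := by unfold Spec_convert_numbers_ary_to_frames_ary; infer_instance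

-- ===== CLAIM (what is proved, stated in full; the proofs are below) =====
def Claim_equal_convert_numbers_ary_to_frames_ary : Prop := ∀ (score_numbers_ary : List Int), Dom_convert_numbers_ary_to_frames_ary score_numbers_ary → Pre_convert_numbers_ary_to_frames_ary score_numbers_ary → Spec_convert_numbers_ary_to_frames_ary score_numbers_ary (convert_numbers_ary_to_frames_ary score_numbers_ary)

-- ===== LEMMAS AND PROOFS =====

lemma pvGetD_drop (xs : List Int) (n k : Nat) :
    (xs.drop n).getD k 0 = xs.getD (n + k) 0 := by
  simp [List.getD, List.getElem?_drop]

-- the per-frame increment, with every roll written as xs.getD (proof-side helper)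
def pvInc (xs : List Int) (i : Nat) : Int :=
  if xs.getD i 0 = 10 ∧ xs.getD (i+1) 0 = 0 then
    10 + xs.getD (i+2) 0 + (if xs.getD (i+2) 0 = 10 then xs.getD (i+4) 0 else xs.getD (i+3) 0)
  else if xs.getD i 0 + xs.getD (i+1) 0 = 10 then 10 + xs.getD (i+2) 0
  else xs.getD i 0 + xs.getD (i+1) 0

-- A's loop-body update equals total + the increment
lemma pvStep_eq (xs : List Int) (total : Int) (i : Nat) :
    pvAStep xs total i = total + pvInc xs i := by
  simp only [pvAStep, pvInc]
  split_ifs <;> omega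

-- one unfolding of B's recursion on a suffix, in terms of the increment
lemma pvGoB_drop (xs : List Int) (i l : Nat) (total : Int) :
    pvGoB (xs.drop i) (l+1) total =
      (total + pvInc xs i) :: pvGoB (xs.drop (i+2)) l (total + pvInc xs i) := by
  simp only [pvGoB, List.drop_drop, pvGetD_drop, Nat.add_zero, pvInc,
    show i+2+2 = i+4 from by omega, show i+2+1 = i+3 from by omega]

-- main invariant: with at least 20 rolls, A's loop at frame f (i = 2f) equals
-- frames ++ B's recursion on the suffix with countdown 10 - f
lemma pvGoA_eq_goB (xs : List Int) (hL : 20 ≤ xs.length) :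
    ∀ (rest : List Int) (f : Nat) (frames : List Int) (total : Int),
      f ≤ 10 → rest.length + f = xs.length →
      pvGoA xs rest frames total (2 * f) =
        frames ++ pvGoB (xs.drop (2 * f)) (10 - f) total := by
  intro rest
  induction rest with
  | nil =>
    intro f frames total hf hlen
    simp only [List.length_nil] at hlen
    omega
  | cons x rs ih =>
    intro f frames total hf hlen
    by_cases hf10 : f = 10
    · subst hf10
      simp [pvGoA, pvGoB]
    · have hflt : f < 10 := by omega
      have hbreak : ¬ 20 ≤ 2 * f := by omega
      rw [show 10 - f = (9 - f) + 1 from by omega, pvGoB_drop xs (2 * f) (9 - f) total]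
      simp only [pvGoA, if_neg hbreak]
      rw [pvStep_eq]
      rw [show (2:ℕ) * f + 2 = 2 * (f + 1) from by ring,
          show 9 - f = 10 - (f + 1) from by omega]
      rw [ih (f + 1) _ _ (by omega) (by simp only [List.length_cons] at hlen; omega)]
      simp

-- ===== VERDICT (by name: the statement is the Claim_ definition above) =====
theorem convert_numbers_ary_to_frames_ary_spec : Claim_equal_convert_numbers_ary_to_frames_ary := by
  intro xs _ hpre
  unfold Spec_convert_numbers_ary_to_frames_ary
  unfold convert_numbers_ary_to_frames_ary convert_numbers_ary_to_frames_ary_alt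
  rcases hpre with h0 | ⟨h20, _⟩
  · subst h0; simp [pvGoA]
  · have hne : xs ≠ [] := by intro h; rw [h] at h20; simp at h20
    have h := pvGoA_eq_goB xs h20 xs 0 [] 0 (by omega) (by omega)
    simpa [hne] using h
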